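-- pv_equiv track=rewrite | github.com/chodakk/ProgrammersAlgorithm | lv2/n^2 배열 자르기.py | solution
-- ===== SOURCE A (Python) =====
-- def solution(n, left, right):
--     answer = []
--
--     for i in range(left+1, right+2) :
--         quotient = i//n
--         remainder = i%n
--
--         if remainder==0 :
--             answer.append(n)
--         else :
--             answer.append(max(quotient+1, remainder))
--
--     return answer
-- ===== SOURCE B (Python) =====
-- def solution(n, left, right):
--     answer = []
--     r0, c0 = divmod(left, n)
--     r1, c1 = divmod(right, n)
--     for r in range(r0, r1 + 1):
--         lo = c0 if r == r0 else 0
--         hi = c1 if r == r1 else n - 1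
--         for c in range(lo, hi + 1):
--             answer.append(max(r, c) + 1)
--     return answer
-- ===== Notes on version B (the rewrite author's own statement) =====
-- stated objective: alternative
-- what changed: A walks flat indices left+1..right+1 computing quotient/remainder and a special-case for remainder 0 per element; B computes the start/end (row,col) once with divmod and traverses row by row, emitting max(row,col)+1 for each column in the row's contributing range.
-- outside the precondition, e.g. on solution(2, 0, 5): A returns [1, 2, 2, 2, 3, 2], B returns [1, 2, 2, 2, 3, 3]; on solution(0, 5, 3): A returns [], B raises ZeroDivisionError
import Mathlib
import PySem

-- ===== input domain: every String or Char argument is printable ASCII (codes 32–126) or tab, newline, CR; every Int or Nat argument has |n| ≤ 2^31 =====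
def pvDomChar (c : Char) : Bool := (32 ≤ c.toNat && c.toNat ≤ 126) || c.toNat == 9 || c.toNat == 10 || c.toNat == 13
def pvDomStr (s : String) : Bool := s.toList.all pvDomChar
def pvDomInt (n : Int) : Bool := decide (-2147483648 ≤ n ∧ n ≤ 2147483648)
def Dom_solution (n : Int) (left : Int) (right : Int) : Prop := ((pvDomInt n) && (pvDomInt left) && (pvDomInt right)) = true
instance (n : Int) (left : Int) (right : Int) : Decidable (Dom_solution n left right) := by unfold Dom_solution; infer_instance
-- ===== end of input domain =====

-- B replaces A's flat index loop (quotient/remainder per element) by a row-by-row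
-- traversal emitting max(row, col) + 1 per cell: a different decomposition, not faster.

-- ===== PORT A =====
def solution (n : Int) (left : Int) (right : Int) : List Int :=
  (PySem.List.pyRange (left + 1) (right + 2) 1).foldl
    (fun answer i =>
      let quotient := PySem.Int.floordiv i n
      let remainder := PySem.Int.mod i n
      if remainder = 0 then answer ++ [n]
      else answer ++ [max (quotient + 1) remainder]) []

-- ===== PORT B =====
def solution_alt (n : Int) (left : Int) (right : Int) : List Int :=
  let r0 := PySem.Int.floordiv left n
  let c0 := PySem.Int.mod left n
  let r1 := PySem.Int.floordiv right n
  let c1 := PySem.Int.mod right n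
  (PySem.List.pyRange r0 (r1 + 1) 1).foldl
    (fun answer r =>
      let lo := if r = r0 then c0 else 0
      let hi := if r = r1 then c1 else n - 1
      (PySem.List.pyRange lo (hi + 1) 1).foldl (fun a c => a ++ [max r c + 1]) answer) []

-- ===== PRECONDITION & SPEC =====
-- Pre_ restricts to the problem's natural domain: n ≥ 1 (n = 0 divides by zero; the array
-- is n×n) and the slice either empty (right < left) or ending inside the array (right < n²);
-- beyond n² both programs would invent values for cells outside the array and they differ.
def Pre_solution (n : Int) (left : Int) (right : Int) : Prop :=
  1 ≤ n ∧ (right < left ∨ right < n * n)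
instance (n : Int) (left : Int) (right : Int) : Decidable (Pre_solution n left right) := by
  unfold Pre_solution; infer_instance
def pvWitness_solution : Int × Int × Int := (4, 2, 10)

def Spec_solution (n : Int) (left : Int) (right : Int) (out : List Int) : Prop := out = solution_alt n left right
instance (n : Int) (left : Int) (right : Int) (out : List Int) : Decidable (Spec_solution n left right out) := by unfold Spec_solution; infer_instance

-- ===== CLAIM (what is proved, stated in full; the proofs are below) =====
def Claim_equal_solution : Prop := ∀ (n : Int) (left : Int) (right : Int), Dom_solution n left right → Pre_solution n left right → Spec_solution n left right (solution n left right)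

-- ===== LEMMAS AND PROOFS =====

-- the value of cell with flat index j: max(row, col) + 1
def pvCell (n j : Int) : Int := max (PySem.Int.floordiv j n) (PySem.Int.mod j n) + 1

-- A's per-element value at loop variable i
def pvA (n i : Int) : Int :=
  if PySem.Int.mod i n = 0 then n else max (PySem.Int.floordiv i n + 1) (PySem.Int.mod i n)

theorem pv_foldl_map {α β : Type} (f : α → β) (l : List α) (init : List β) :
    l.foldl (fun a x => a ++ [f x]) init = init ++ l.map f := by
  induction l generalizing init with
  | nil => simp
  | cons x xs ih => simp [List.foldl, ih]

theorem pv_foldl_app {α β : Type} (g : α → List β) (l : List α) (init : List β) :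
    l.foldl (fun a x => a ++ g x) init = init ++ l.flatMap g := by
  induction l generalizing init with
  | nil => simp
  | cons x xs ih => simp [List.foldl, ih]

theorem pv_flatMap_congr {α β : Type} {f g : α → List β} (l : List α)
    (h : ∀ x ∈ l, f x = g x) : l.flatMap f = l.flatMap g := by
  induction l with
  | nil => rfl
  | cons x xs ih => simp only [List.flatMap_cons]; rw [h x (by simp), ih (fun y hy => h y (by simp [hy]))]

theorem solution_as_map (n left right : Int) :
    solution n left right = (PySem.List.pyRange (left + 1) (right + 2) 1).map (pvA n) := by
  unfold solution
  generalize PySem.List.pyRange (left + 1) (right + 2) 1 = l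
  suffices h : ∀ init : List Int, l.foldl
      (fun answer i =>
        let quotient := PySem.Int.floordiv i n
        let remainder := PySem.Int.mod i n
        if remainder = 0 then answer ++ [n]
        else answer ++ [max (quotient + 1) remainder]) init = init ++ l.map (pvA n) by
    simpa using h []
  induction l with
  | nil => simp
  | cons x xs ih =>
    intro init
    simp only [List.foldl, List.map]
    by_cases hx : PySem.Int.mod x n = 0 <;> simp [hx, ih, pvA]

theorem alt_as_flatMap (n left right : Int) :
    solution_alt n left right =
      (PySem.List.pyRange (PySem.Int.floordiv left n) (PySem.Int.floordiv right n + 1) 1).flatMap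
        (fun r =>
          (PySem.List.pyRange (if r = PySem.Int.floordiv left n then PySem.Int.mod left n else 0)
              ((if r = PySem.Int.floordiv right n then PySem.Int.mod right n else n - 1) + 1) 1).map
            (fun c => max r c + 1)) := by
  unfold solution_alt
  simp only
  have hbody : (fun (answer : List Int) (r : Int) =>
      (PySem.List.pyRange (if r = PySem.Int.floordiv left n then PySem.Int.mod left n else 0)
          ((if r = PySem.Int.floordiv right n then PySem.Int.mod right n else n - 1) + 1) 1).foldl
        (fun a c => a ++ [max r c + 1]) answer) =
      (fun (answer : List Int) (r : Int) => answer ++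
        (PySem.List.pyRange (if r = PySem.Int.floordiv left n then PySem.Int.mod left n else 0)
            ((if r = PySem.Int.floordiv right n then PySem.Int.mod right n else n - 1) + 1) 1).map
          (fun c => max r c + 1)) := by
    funext answer r
    exact pv_foldl_map (fun c => max r c + 1) _ answer
  rw [hbody, pv_foldl_app]
  simp

-- floor-division brackets for a positive divisor
theorem pv_bracket (n a : Int) (hn : 0 < n) :
    PySem.Int.floordiv a n * n ≤ a ∧ a < (PySem.Int.floordiv a n + 1) * n :=
  (PySem.Int.floordiv_eq_iff_of_pos (a := a) (b := n) (q := PySem.Int.floordiv a n) hn).mp rfl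

theorem pv_fd_eq (n r c : Int) (hn : 0 < n) (hc0 : 0 ≤ c) (hc1 : c < n) :
    PySem.Int.floordiv (r * n + c) n = r := by
  rw [PySem.Int.floordiv_eq_iff_of_pos hn]
  have h : (r + 1) * n = r * n + n := by ring
  omega

theorem pv_md_eq (n r c : Int) (hn : 0 < n) (hc0 : 0 ≤ c) (hc1 : c < n) :
    PySem.Int.mod (r * n + c) n = c := by
  have h := PySem.Int.floordiv_mul_add_mod (r * n + c) n
  rw [pv_fd_eq n r c hn hc0 hc1] at h
  omega

theorem pv_fd_mono (n a b : Int) (hn : 0 < n) (hab : a ≤ b) :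
    PySem.Int.floordiv a n ≤ PySem.Int.floordiv b n := by
  by_contra h
  have ha := pv_bracket n a hn
  have hb := pv_bracket n b hn
  have h1 : PySem.Int.floordiv b n + 1 ≤ PySem.Int.floordiv a n := by omega
  have h2 : (PySem.Int.floordiv b n + 1) * n ≤ PySem.Int.floordiv a n * n :=
    mul_le_mul_of_nonneg_right h1 (by omega)
  omega

-- one row: columns lo..hi of row r are the flat cells r*n+lo .. r*n+hi
theorem pv_row (n r lo hi : Int) (hn : 0 < n) (hlo : 0 ≤ lo) (hhi : hi < n) :
    (PySem.List.pyRange lo (hi + 1) 1).map (fun c => max r c + 1) =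
      (PySem.List.pyRange (r * n + lo) (r * n + hi + 1) 1).map (pvCell n) := by
  rw [PySem.List.pyRange_one, PySem.List.pyRange_one]
  have hlen : (hi + 1 - lo).toNat = (r * n + hi + 1 - (r * n + lo)).toNat := by omega
  rw [← hlen, List.map_map, List.map_map]
  apply List.map_congr_left
  intro k hk
  simp only [List.mem_range] at hk
  have hk' : (lo + (k : Int)) ≤ hi := by omega
  simp only [Function.comp]
  rw [pvCell, show r * n + lo + (k : Int) = r * n + (lo + k) by ring,
    pv_fd_eq n r (lo + k) hn (by omega) (by omega),
    pv_md_eq n r (lo + k) hn (by omega) (by omega)]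

-- shift the range by one
theorem pv_shift (a b : Int) :
    PySem.List.pyRange (a + 1) (b + 1) 1 = (PySem.List.pyRange a b 1).map (· + 1) := by
  rw [PySem.List.pyRange_one, PySem.List.pyRange_one]
  have h : (b + 1 - (a + 1)).toNat = (b - a).toNat := by omega
  rw [h, List.map_map]
  apply List.map_congr_left
  intro k _
  simp only [Function.comp]
  ring

-- A's per-element value at i = j+1 equals the cell value at j, inside the array
theorem pv_point (n j : Int) (hn : 0 < n) (hj : j + 1 ≤ n * n) :
    pvA n (j + 1) = pvCell n j := by
  have hmod := PySem.Int.floordiv_mul_add_mod (j + 1) n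
  have hr0 : 0 ≤ PySem.Int.mod (j + 1) n := PySem.Int.mod_nonneg (j + 1) hn
  have hrn : PySem.Int.mod (j + 1) n < n := PySem.Int.mod_lt (j + 1) hn
  by_cases h0 : PySem.Int.mod (j + 1) n = 0
  · have hqn : PySem.Int.floordiv (j + 1) n ≤ n := by
      by_contra hq
      have h1 : (n + 1) * n ≤ PySem.Int.floordiv (j + 1) n * n :=
        mul_le_mul_of_nonneg_right (by omega) (by omega)
      have h2 : (n + 1) * n = n * n + n := by ring
      omega
    have hjrep : j = (PySem.Int.floordiv (j + 1) n - 1) * n + (n - 1) := by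
      have h3 : (PySem.Int.floordiv (j + 1) n - 1) * n = PySem.Int.floordiv (j + 1) n * n - n := by
        ring
      omega
    simp only [pvA, pvCell, if_pos h0]
    conv_rhs => rw [hjrep]
    rw [pv_fd_eq n _ (n - 1) hn (by omega) (by omega),
      pv_md_eq n _ (n - 1) hn (by omega) (by omega)]
    omega
  · have hjrep : j = PySem.Int.floordiv (j + 1) n * n + (PySem.Int.mod (j + 1) n - 1) := by omega
    simp only [pvA, pvCell, if_neg h0]
    conv_rhs => rw [hjrep]
    rw [pv_fd_eq n _ _ hn (by omega) (by omega), pv_md_eq n _ _ hn (by omega) (by omega)]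
    omega

-- the main row induction: B's row blocks concatenate to the flat cell map
theorem pv_rows (n : Int) (hn : 0 < n) :
    ∀ k : Nat, ∀ left right : Int, left ≤ right →
      (PySem.Int.floordiv right n - PySem.Int.floordiv left n).toNat = k →
      (PySem.List.pyRange (PySem.Int.floordiv left n) (PySem.Int.floordiv right n + 1) 1).flatMap
        (fun r =>
          (PySem.List.pyRange (if r = PySem.Int.floordiv left n then PySem.Int.mod left n else 0)
              ((if r = PySem.Int.floordiv right n then PySem.Int.mod right n else n - 1) + 1) 1).map
            (fun c => max r c + 1)) =
      (PySem.List.pyRange left (right + 1) 1).map (pvCell n) := by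
  intro k
  induction k with
  | zero =>
    intro left right hlr hk
    have hmono := pv_fd_mono n left right hn hlr
    have heq : PySem.Int.floordiv left n = PySem.Int.floordiv right n := by omega
    have hml := PySem.Int.floordiv_mul_add_mod left n
    have hmr := PySem.Int.floordiv_mul_add_mod right n
    have h2 : PySem.Int.floordiv left n * n = PySem.Int.floordiv right n * n := by rw [heq]
    rw [← heq, PySem.List.pyRange_one_singleton, List.flatMap_cons, List.flatMap_nil,
      List.append_nil, if_pos rfl, if_pos rfl,
      pv_row n (PySem.Int.floordiv left n) (PySem.Int.mod left n) (PySem.Int.mod right n) hn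
        (PySem.Int.mod_nonneg left hn) (PySem.Int.mod_lt right hn)]
    congr 2
    omega
  | succ k ih =>
    intro left right hlr hk
    set r0 := PySem.Int.floordiv left n with hr0
    set r1 := PySem.Int.floordiv right n with hr1
    have hlt : r0 < r1 := by omega
    set left' := (r0 + 1) * n with hl'
    have hfd' : PySem.Int.floordiv left' n = r0 + 1 := by
      rw [hl', show (r0 + 1) * n = (r0 + 1) * n + 0 by ring]
      exact pv_fd_eq n (r0 + 1) 0 hn le_rfl hn
    have hmd' : PySem.Int.mod left' n = 0 := by
      rw [hl', show (r0 + 1) * n = (r0 + 1) * n + 0 by ring]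
      exact pv_md_eq n (r0 + 1) 0 hn le_rfl hn
    have hbl := pv_bracket n left hn
    have hbr := pv_bracket n right hn
    rw [← hr0] at hbl
    rw [← hr1] at hbr
    have hl'le : left' ≤ right := by
      have h3 : (r0 + 1) * n ≤ r1 * n := mul_le_mul_of_nonneg_right (by omega) (by omega)
      omega
    have hstep := ih left' right hl'le (by rw [hfd', ← hr1]; omega)
    rw [hfd', ← hr1] at hstep
    -- split off the first row
    rw [PySem.List.pyRange_one_cons (by omega), List.flatMap_cons, if_pos rfl,
      if_neg (by omega)]
    -- rewrite the tail's body to the shifted call's body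
    have htail :
        (PySem.List.pyRange (r0 + 1) (r1 + 1) 1).flatMap
          (fun r =>
            (PySem.List.pyRange (if r = r0 then PySem.Int.mod left n else 0)
                ((if r = r1 then PySem.Int.mod right n else n - 1) + 1) 1).map
              (fun c => max r c + 1)) =
        (PySem.List.pyRange (r0 + 1) (r1 + 1) 1).flatMap
          (fun r =>
            (PySem.List.pyRange (if r = r0 + 1 then PySem.Int.mod left' n else 0)
                ((if r = r1 then PySem.Int.mod right n else n - 1) + 1) 1).map
              (fun c => max r c + 1)) := by
      apply pv_flatMap_congr
      intro r hr
      rw [PySem.List.mem_pyRange_one] at hr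
      rw [if_neg (by omega)]
      by_cases h : r = r0 + 1
      · rw [if_pos h, hmd']
      · rw [if_neg h]
    rw [htail, hstep]
    -- first row: cells left .. left'-1
    have hml := PySem.Int.floordiv_mul_add_mod left n
    rw [← hr0] at hml
    have hrow := pv_row n r0 (PySem.Int.mod left n) (n - 1) hn
      (PySem.Int.mod_nonneg left hn) (by omega)
    rw [show r0 * n + PySem.Int.mod left n = left by omega,
      show r0 * n + (n - 1) + 1 = left' by rw [hl']; ring] at hrow
    rw [hrow, ← List.map_append, ← PySem.List.pyRange_one_append left left' (right + 1)
      (by omega) (by omega)]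

-- ===== VERDICT (by name: the statement is the Claim_ definition above) =====
theorem solution_spec : Claim_equal_solution := by
  intro n left right _ hpre
  obtain ⟨hn, hcase⟩ := hpre
  have hn0 : 0 < n := hn
  unfold Spec_solution
  by_cases hlr : right < left
  · -- empty slice: both return []
    rw [solution_as_map, PySem.List.pyRange_one_eq_nil (by omega), List.map_nil,
      alt_as_flatMap]
    have hmono := pv_fd_mono n right left hn0 (by omega)
    by_cases h : PySem.Int.floordiv right n < PySem.Int.floordiv left n
    · rw [PySem.List.pyRange_one_eq_nil (by omega), List.flatMap_nil]
    · have heq : PySem.Int.floordiv left n = PySem.Int.floordiv right n := by omega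
      have hml := PySem.Int.floordiv_mul_add_mod left n
      have hmr := PySem.Int.floordiv_mul_add_mod right n
      have h2 : PySem.Int.floordiv left n * n = PySem.Int.floordiv right n * n := by rw [heq]
      rw [← heq, PySem.List.pyRange_one_singleton, List.flatMap_cons, List.flatMap_nil,
        List.append_nil, if_pos rfl, if_pos rfl,
        PySem.List.pyRange_one_eq_nil (by omega), List.map_nil]
  · -- nonempty: both equal the flat cell map
    have hlr' : left ≤ right := by omega
    have hnn : right < n * n := by
      rcases hcase with h | h
      · omega
      · exact h
    rw [solution_as_map, show right + 2 = (right + 1) + 1 by ring, pv_shift, List.map_map,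
      alt_as_flatMap, pv_rows n hn0 (PySem.Int.floordiv right n - PySem.Int.floordiv left n).toNat
        left right hlr' rfl]
    apply List.map_congr_left
    intro j hj
    rw [PySem.List.mem_pyRange_one] at hj
    exact pv_point n j hn0 (by omega)
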